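-- pv_equiv track=rewrite | github.com/kakolla/Problems | py/file_dir.py | resolve_symlink
-- ===== SOURCE A (Python) =====
-- def resolve_symlink(path: str, symlinkmap: dict[str, str]) -> str:
--     visited = set()
--
--     while path in symlinkmap:
--         if path in visited:
--             raise ValueError("Symlink loop detected")
--         visited.add(path)
--
--         path = symlinkmap[path]
--
--     return path
-- ===== SOURCE B (Python) =====
-- def resolve_symlink(path: str, symlinkmap: dict[str, str]) -> str:
--     # Pigeonhole: a terminating chain visits distinct keys, so it leaves the
--     # map within len(symlinkmap) steps; more iterations means a loop.
--     for _ in range(len(symlinkmap) + 1):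
--         if path not in symlinkmap:
--             return path
--         path = symlinkmap[path]
--     raise ValueError("Symlink loop detected")
-- ===== Notes on version B (the rewrite author's own statement) =====
-- stated objective: alternative
-- what changed: Replaces A's accumulating visited-set loop detection by a bounded for-loop: by the pigeonhole principle a terminating chain leaves the key set within len(symlinkmap) steps, so after len+1 iterations without resolving B raises the same ValueError, using O(1) extra space.
import Mathlib
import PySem

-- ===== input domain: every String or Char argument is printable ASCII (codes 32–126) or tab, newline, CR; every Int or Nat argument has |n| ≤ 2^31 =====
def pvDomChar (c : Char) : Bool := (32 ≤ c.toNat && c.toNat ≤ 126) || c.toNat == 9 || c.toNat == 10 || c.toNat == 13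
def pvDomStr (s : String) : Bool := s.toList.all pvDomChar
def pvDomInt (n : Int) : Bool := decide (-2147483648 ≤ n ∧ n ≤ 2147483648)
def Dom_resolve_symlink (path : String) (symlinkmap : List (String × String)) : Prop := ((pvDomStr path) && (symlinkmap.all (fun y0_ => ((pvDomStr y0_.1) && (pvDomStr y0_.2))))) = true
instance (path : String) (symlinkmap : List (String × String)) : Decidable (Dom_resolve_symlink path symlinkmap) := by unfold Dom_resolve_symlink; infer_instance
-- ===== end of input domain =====

-- B replaces A's accumulating visited set by a bounded for-loop (pigeonhole: a terminating chain
-- leaves the key set within len(symlinkmap) steps); same value, same ValueError on a loop (outside Pre_).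

-- ===== PORT A =====
-- A's while-loop with its visited set; fuel symlinkmap.length + 2 (the loop raises — `none` — within
-- that many iterations, since each iteration adds a fresh key of the map to `visited`).
def aGo (m : List (String × String)) : Nat → PySem.Set String → String → Option String
  | 0, _, _ => none
  | fuel + 1, visited, path =>
    match PySem.Dict.get? ⟨m⟩ path with
    | none => some path
    | some next =>
      if visited.contains path then none    -- raise ValueError("Symlink loop detected")
      else aGo m fuel (visited.add path) next

def resolve_symlink (path : String) (symlinkmap : List (String × String)) : String :=
  (aGo symlinkmap (symlinkmap.length + 2) PySem.Set.empty path).getD ""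

-- ===== PORT B =====
-- Source B's `for _ in range(len(symlinkmap) + 1)` ported as a fold over that range; the state is
-- (done, path): done = the Python `return` fired. An unresolved final state is the raise (`""`
-- is never returned: Pre_ excludes those inputs).
def bStep (m : List (String × String)) (st : Bool × String) : Bool × String :=
  if st.1 then st
  else
    match PySem.Dict.get? ⟨m⟩ st.2 with
    | none => (true, st.2)
    | some nxt => (false, nxt)

def resolve_symlink_alt (path : String) (symlinkmap : List (String × String)) : String :=
  ((List.range (symlinkmap.length + 1)).foldl (fun st _ => bStep symlinkmap st) (false, path)).2

-- ===== PRECONDITION & SPEC =====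
-- the one-step successor, used only to STATE the precondition
def pvStep (m : List (String × String)) (x : String) : String :=
  (PySem.Dict.get? ⟨m⟩ x).getD x

-- Pre_ excludes exactly the inputs whose symlink chain from `path` never reaches a non-key
-- (a symlink loop): there Python A raises ValueError, and B raises the same ValueError.
-- (A chain that terminates does so within symlinkmap.length steps, as its prefixes are distinct keys.)
def Pre_resolve_symlink (path : String) (symlinkmap : List (String × String)) : Prop :=
  ∃ n, n ≤ symlinkmap.length ∧ PySem.Dict.get? ⟨symlinkmap⟩ ((pvStep symlinkmap)^[n] path) = none
instance (path : String) (symlinkmap : List (String × String)) : Decidable (Pre_resolve_symlink path symlinkmap) := by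
  unfold Pre_resolve_symlink; infer_instance

def pvWitness_resolve_symlink : String × (List (String × String)) := ("a", [("a", "b")])

def Spec_resolve_symlink (path : String) (symlinkmap : List (String × String)) (out : String) : Prop := out = resolve_symlink_alt path symlinkmap
instance (path : String) (symlinkmap : List (String × String)) (out : String) : Decidable (Spec_resolve_symlink path symlinkmap out) := by unfold Spec_resolve_symlink; infer_instance

-- ===== CLAIM =====
def Claim_equal_resolve_symlink : Prop := ∀ (path : String) (symlinkmap : List (String × String)), Dom_resolve_symlink path symlinkmap → Pre_resolve_symlink path symlinkmap → Spec_resolve_symlink path symlinkmap (resolve_symlink path symlinkmap)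

-- ===== LEMMAS AND PROOFS =====

theorem aGo_succ (m : List (String × String)) (fuel : Nat) (visited : PySem.Set String) (path : String) :
    aGo m (fuel + 1) visited path =
      match PySem.Dict.get? ⟨m⟩ path with
      | none => some path
      | some next => if visited.contains path then none else aGo m fuel (visited.add path) next := rfl

theorem pvStep_eq_of_look {m : List (String × String)} {x y : String}
    (h : PySem.Dict.get? ⟨m⟩ x = some y) : pvStep m x = y := by
  simp [pvStep, h]

-- On a chain that first leaves the key set at step n, the first n+1 chain elements are pairwise distinct.
theorem pv_chain_inj (m : List (String × String)) (path : String) {n : Nat}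
    (hn : PySem.Dict.get? ⟨m⟩ ((pvStep m)^[n] path) = none)
    (hmin : ∀ i < n, PySem.Dict.get? ⟨m⟩ ((pvStep m)^[i] path) ≠ none) :
    ∀ i j, i < j → j ≤ n → (pvStep m)^[i] path ≠ (pvStep m)^[j] path := by
  intro i j hij hjn heq
  set s := pvStep m with hs
  have hper : ∀ e, s^[i + e + (j - i)] path = s^[i + e] path := by
    intro e
    rw [show i + e + (j - i) = e + j by omega, Function.iterate_add_apply,
        ← heq, ← Function.iterate_add_apply, show e + i = i + e by omega]
  have hrep : ∀ q e, s^[i + e + q * (j - i)] path = s^[i + e] path := by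
    intro q
    induction q with
    | zero => intro e; simp
    | succ q ih =>
      intro e
      calc s^[i + e + (q + 1) * (j - i)] path
          = s^[i + (e + (j - i)) + q * (j - i)] path := by
            rw [show i + e + (q + 1) * (j - i) = i + (e + (j - i)) + q * (j - i) by ring]
        _ = s^[i + (e + (j - i))] path := ih _
        _ = s^[i + e] path := by rw [show i + (e + (j - i)) = i + e + (j - i) by omega, hper]
  have hp : 0 < j - i := by omega
  have hmlt : (n - i) % (j - i) < j - i := Nat.mod_lt _ hp
  have hdecomp : n = i + (n - i) % (j - i) + ((n - i) / (j - i)) * (j - i) := by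
    have h1 := Nat.div_add_mod (n - i) (j - i)
    have h2 : ((n - i) / (j - i)) * (j - i) = (j - i) * ((n - i) / (j - i)) := Nat.mul_comm _ _
    omega
  have hlt : i + (n - i) % (j - i) < n := by omega
  have := hmin _ hlt
  rw [← hrep ((n - i) / (j - i)) ((n - i) % (j - i)), ← hdecomp] at this
  exact this hn

theorem pv_aGo_eq (m : List (String × String)) :
    ∀ (n : Nat) (path : String) (visited : PySem.Set String) (fuel : Nat),
      PySem.Dict.get? ⟨m⟩ ((pvStep m)^[n] path) = none →
      (∀ i < n, PySem.Dict.get? ⟨m⟩ ((pvStep m)^[i] path) ≠ none) →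
      n < fuel →
      (∀ i ≤ n, (pvStep m)^[i] path ∉ visited) →
      aGo m fuel visited path = some ((pvStep m)^[n] path) := by
  intro n
  induction n with
  | zero =>
    intro path visited fuel hn _ hfuel _
    obtain ⟨f, rfl⟩ := Nat.exists_eq_add_of_lt hfuel
    simp at hn
    simp [aGo, hn]
  | succ n ih =>
    intro path visited fuel hn hmin hfuel hvis
    obtain ⟨f, rfl⟩ := Nat.exists_eq_add_of_lt hfuel
    have h0 : PySem.Dict.get? ⟨m⟩ path ≠ none := by
      have := hmin 0 (Nat.succ_pos n); simpa using this
    obtain ⟨next, hnext⟩ := Option.ne_none_iff_exists'.mp h0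
    have hstep : pvStep m path = next := pvStep_eq_of_look hnext
    have hnv : visited.contains path = false := by
      have := hvis 0 (Nat.zero_le _)
      simp only [Function.iterate_zero, id_eq] at this
      simp only [PySem.Set.contains, List.contains_eq_mem, this, decide_false]
    have hchain : ∀ k, (pvStep m)^[k] next = (pvStep m)^[k + 1] path := by
      intro k; rw [Function.iterate_succ_apply, hstep]
    rw [show n + 1 + f + 1 = (n + f + 1) + 1 by omega, aGo_succ]
    simp only [hnext, hnv, Bool.false_eq_true, if_false]
    have ihx := ih next (visited.add path) (n + f + 1)
      (by rw [hchain]; exact hn)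
      (by intro i hi; rw [hchain]; exact hmin (i + 1) (by omega))
      (by omega)
      (by
        intro i hi hmem
        rw [PySem.Set.mem_add] at hmem
        rcases hmem with hmem | hmem
        · exact hvis (i + 1) (by omega) (hchain i ▸ hmem)
        · exact pv_chain_inj m path hn hmin 0 (i + 1) (by omega) (by omega)
            (by simpa using ((hchain i ▸ hmem) : (pvStep m)^[i+1] path = path).symm))
    rw [ihx, hchain]

-- B's fold ignores the range elements, so it is an iterate of bStep.
theorem pv_foldl_iterate (m : List (String × String)) (l : List Nat) (st : Bool × String) :
    l.foldl (fun s _ => bStep m s) st = (bStep m)^[l.length] st := by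
  induction l generalizing st with
  | nil => rfl
  | cons x xs ih => simp [List.foldl, ih, Function.iterate_succ_apply]

theorem pv_bStep_done (m : List (String × String)) (p : String) (j : Nat) :
    (bStep m)^[j] (true, p) = (true, p) :=
  Function.iterate_fixed (by simp [bStep]) j

theorem pv_bIter_eq (m : List (String × String)) :
    ∀ (n : Nat) (path : String) (L : Nat),
      PySem.Dict.get? ⟨m⟩ ((pvStep m)^[n] path) = none →
      (∀ i < n, PySem.Dict.get? ⟨m⟩ ((pvStep m)^[i] path) ≠ none) →
      n < L →
      (bStep m)^[L] (false, path) = (true, (pvStep m)^[n] path) := by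
  intro n
  induction n with
  | zero =>
    intro path L hn _ hL
    obtain ⟨f, rfl⟩ := Nat.exists_eq_add_of_lt hL
    simp only [Function.iterate_zero, id_eq] at hn
    rw [show 0 + f + 1 = f + 1 by omega, Function.iterate_succ_apply]
    simp [bStep, hn, pv_bStep_done]
  | succ n ih =>
    intro path L hn hmin hL
    obtain ⟨f, rfl⟩ := Nat.exists_eq_add_of_lt hL
    have h0 : PySem.Dict.get? ⟨m⟩ path ≠ none := by
      have := hmin 0 (Nat.succ_pos n); simpa using this
    obtain ⟨next, hnext⟩ := Option.ne_none_iff_exists'.mp h0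
    have hstep : pvStep m path = next := pvStep_eq_of_look hnext
    have hchain : ∀ k, (pvStep m)^[k] next = (pvStep m)^[k + 1] path := by
      intro k; rw [Function.iterate_succ_apply, hstep]
    rw [show n + 1 + f + 1 = (n + f + 1) + 1 by omega, Function.iterate_succ_apply]
    have hfire : bStep m (false, path) = (false, next) := by simp [bStep, hnext]
    rw [hfire, ih next (n + f + 1) (by rw [hchain]; exact hn)
        (by intro i hi; rw [hchain]; exact hmin (i + 1) (by omega)) (by omega), hchain]

-- ===== VERDICT =====
theorem resolve_symlink_spec : Claim_equal_resolve_symlink := by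
  intro path m _ hpre
  unfold Spec_resolve_symlink
  obtain ⟨n0, hn0, hlook⟩ := hpre
  have hex : ∃ n, PySem.Dict.get? ⟨m⟩ ((pvStep m)^[n] path) = none := ⟨n0, hlook⟩
  set k := Nat.find hex with hk
  have hkn : PySem.Dict.get? ⟨m⟩ ((pvStep m)^[k] path) = none := Nat.find_spec hex
  have hkmin : ∀ i < k, PySem.Dict.get? ⟨m⟩ ((pvStep m)^[i] path) ≠ none := fun i hi => Nat.find_min hex hi
  have hkle : k ≤ m.length := le_trans (Nat.find_min' hex hlook) hn0
  have ha : aGo m (m.length + 2) PySem.Set.empty path = some ((pvStep m)^[k] path) := by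
    apply pv_aGo_eq m k path PySem.Set.empty (m.length + 2) hkn hkmin (by omega)
    intro i _ hmem
    simp [PySem.Set.empty] at hmem
  have hb : (bStep m)^[(List.range (m.length + 1)).length] (false, path)
      = (true, (pvStep m)^[k] path) := by
    rw [List.length_range]
    exact pv_bIter_eq m k path (m.length + 1) hkn hkmin (by omega)
  rw [resolve_symlink, resolve_symlink_alt, ha, pv_foldl_iterate, hb]; rfl
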